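-- pv_equiv track=rewrite | github.com/Mnajm6201/Alexandria | backend/library/utils/genre_utils.py | get_primary_genre
-- ===== SOURCE A (Python) =====
-- from typing import Dict, List, Set, Optional, Tuple
--
-- def get_primary_genre(genres: Set[str]) -> str:
--     """
--     Determine the primary genre from a set of genres.
--
--     This uses a basic priority system to select the most appropriate
--     primary genre when multiple genres are present.
--
--     Args:
--         genres: Set of normalized genre strings
--
--     Returns:
--         The primary genre string
--     """
--     # Priority list for primary genre selection
--     priority_genres = [
--         "fantasy", "science fiction", "mystery", "thriller",
--         "horror", "romance", "historical fiction", "literary fiction",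
--         "classics", "young adult", "children's fiction"
--     ]
--
--     # Check for genres in priority order
--     for genre in priority_genres:
--         if genre in genres:
--             return genre
--
--     # If no priority genre is found, return the first one alphabetically
--     return sorted(genres)[0] if genres else "fiction"
-- ===== SOURCE B (Python) =====
-- def get_primary_genre(genres):
--     """
--     Determine the primary genre from a set of genres.
--
--     Inverted traversal: instead of scanning the priority list and
--     membership-testing the set, build a rank index once and take the
--     minimum-rank genre present; alphabetical min as fallback.
--     """
--     priority_genres = [
--         "fantasy", "science fiction", "mystery", "thriller",
--         "horror", "romance", "historical fiction", "literary fiction",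
--         "classics", "young adult", "children's fiction"
--     ]
--     ranks = {g: i for i, g in enumerate(priority_genres)}
--     if not genres:
--         return "fiction"
--     candidates = [g for g in genres if g in ranks]
--     if candidates:
--         return min(candidates, key=ranks.get)
--     return min(genres)
-- ===== Notes on version B (the rewrite author's own statement) =====
-- stated objective: alternative
-- what changed: Instead of scanning the priority list and membership-testing the input set, B builds a rank dictionary once and selects the minimum-rank genre present in the input (min with key), falling back to min(genres) instead of sorted(genres)[0].
import Mathlib
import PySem

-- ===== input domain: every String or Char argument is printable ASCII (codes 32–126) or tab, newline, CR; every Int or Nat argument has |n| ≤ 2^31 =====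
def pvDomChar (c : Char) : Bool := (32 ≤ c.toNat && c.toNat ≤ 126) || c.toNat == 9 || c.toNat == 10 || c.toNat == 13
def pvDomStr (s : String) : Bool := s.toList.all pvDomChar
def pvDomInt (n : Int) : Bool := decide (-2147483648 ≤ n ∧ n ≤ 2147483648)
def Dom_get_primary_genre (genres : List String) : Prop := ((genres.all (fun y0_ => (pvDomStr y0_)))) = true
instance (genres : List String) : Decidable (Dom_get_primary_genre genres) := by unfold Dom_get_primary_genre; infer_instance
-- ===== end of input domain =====

-- B inverts A's traversal: a rank dictionary over the priority list plus min-by-rank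
-- over the genres present, instead of scanning the priority list with membership tests.

-- ===== PORT A =====
def pvPriorityA : List String :=
  ["fantasy", "science fiction", "mystery", "thriller",
   "horror", "romance", "historical fiction", "literary fiction",
   "classics", "young adult", "children's fiction"]

-- 'for genre in priority_genres: if genre in genres: return genre'
def pvScanA (genres : List String) : List String → Option String
  | [] => none
  | p :: ps => if genres.contains p then some p else pvScanA genres ps

def get_primary_genre (genres : List String) : String :=
  match pvScanA genres pvPriorityA with
  | some g => g
  | none =>
      -- 'return sorted(genres)[0] if genres else "fiction"' (headD default unreachable: genres ≠ [])
      if genres = [] then "fiction"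
      else (PySem.List.sorted genres (fun x => x) false).headD "fiction"

-- ===== PORT B =====
def pvPriorityB : List String :=
  ["fantasy", "science fiction", "mystery", "thriller",
   "horror", "romance", "historical fiction", "literary fiction",
   "classics", "young adult", "children's fiction"]

-- ranks = {g: i for i, g in enumerate(priority_genres)}
def pvRanksB : PySem.Dict String Int :=
  (PySem.List.enumerate pvPriorityB 0).foldl (fun d p => d.insert p.2 p.1) PySem.Dict.empty

def get_primary_genre_alt (genres : List String) : String :=
  if genres = [] then "fiction"
  else
    let candidates := genres.filter (fun g => PySem.Dict.contains pvRanksB g)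
    if candidates ≠ [] then
      -- min(candidates, key=ranks.get): ranks.get never misses on candidates, so getD's default is unreachable
      (PySem.List.min? candidates (fun g => PySem.Dict.getD pvRanksB g 0)).getD "fiction"
    else
      (PySem.List.min? genres (fun x => x)).getD "fiction"

-- ===== PRECONDITION & SPEC =====
def Spec_get_primary_genre (genres : List String) (out : String) : Prop := out = get_primary_genre_alt genres
instance (genres : List String) (out : String) : Decidable (Spec_get_primary_genre genres out) := by unfold Spec_get_primary_genre; infer_instance

-- ===== CLAIM (what is proved, stated in full; the proofs are below) =====
def Claim_equal_get_primary_genre : Prop := ∀ (genres : List String), Dom_get_primary_genre genres → Spec_get_primary_genre genres (get_primary_genre genres)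

-- ===== LEMMAS AND PROOFS =====

lemma pv_ranks_fold (ps : List String) (hnd : ps.Nodup) (s : Int)
    (d : PySem.Dict String Int) (g : String) :
    ((PySem.List.enumerate ps s).foldl (fun d p => d.insert p.2 p.1) d).get? g =
      match PySem.List.index? ps g with
      | some k => some (s + k)
      | none => d.get? g := by
  induction ps generalizing s d with
  | nil => simp [PySem.List.enumerate_nil, PySem.List.index?_eq_idxOf?]
  | cons p ps ih =>
    rw [PySem.List.enumerate_cons]
    simp only [List.foldl_cons]
    rcases List.nodup_cons.mp hnd with ⟨hp, hnd'⟩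
    by_cases hg : g = p
    · subst hg
      have hidx : PySem.List.index? ps g = none := (PySem.List.index?_eq_none_iff ps g).mpr hp
      rw [ih hnd' (s+1) (d.insert g s), PySem.List.index?_cons_self, hidx]
      simp [PySem.Dict.get?_insert_self]
    · rw [ih hnd' (s+1) (d.insert p s), PySem.List.index?_cons_of_ne ps (Ne.symm hg)]
      cases hidx : PySem.List.index? ps g with
      | none => exact PySem.Dict.get?_insert_of_ne d s hg
      | some k => simp; ring

lemma pv_ranks_get (g : String) :
    PySem.Dict.get? pvRanksB g = (PySem.List.index? pvPriorityA g).map (fun n => (n : Int)) := by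
  have hnd : pvPriorityB.Nodup := by decide
  have h := pv_ranks_fold pvPriorityB hnd 0 PySem.Dict.empty g
  have heq : pvPriorityB = pvPriorityA := rfl
  show ((PySem.List.enumerate pvPriorityB 0).foldl (fun d p => d.insert p.2 p.1) PySem.Dict.empty).get? g = _
  rw [h, heq]
  cases PySem.List.index? pvPriorityA g with
  | none => simp [PySem.Dict.get?_empty]
  | some k => simp

lemma pv_ranks_contains (g : String) :
    PySem.Dict.contains pvRanksB g = true ↔ g ∈ pvPriorityA := by
  rw [PySem.Dict.contains_eq_isSome_get?, pv_ranks_get]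
  rw [show ∀ o : Option Nat, (o.map (fun n => (n : Int))).isSome = o.isSome from fun o => by cases o <;> rfl]
  exact PySem.List.index?_isSome_iff pvPriorityA g

lemma pv_scan_none {genres ps : List String} (h : pvScanA genres ps = none) :
    ∀ p ∈ ps, p ∉ genres := by
  induction ps with
  | nil => simp
  | cons p ps ih =>
    by_cases hc : p ∈ genres
    · simp [pvScanA, hc] at h
    · have h' : pvScanA genres ps = none := by simpa [pvScanA, hc] using h
      intro q hq
      rcases List.mem_cons.mp hq with hq | hq
      · exact hq ▸ hc
      · exact ih h' q hq

lemma pv_scan_some {genres ps : List String} {q : String} (h : pvScanA genres ps = some q) :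
    ∃ pre suf, ps = pre ++ q :: suf ∧ q ∈ genres ∧
      ∀ p ∈ pre, p ∉ genres := by
  induction ps with
  | nil => simp [pvScanA] at h
  | cons p ps ih =>
    by_cases hc : p ∈ genres
    · have hq : p = q := by simpa [pvScanA, hc] using h
      exact ⟨[], ps, by simp [hq], hq ▸ hc, by simp⟩
    · have h' : pvScanA genres ps = some q := by simpa [pvScanA, hc] using h
      obtain ⟨pre, suf, hps, hq, hpre⟩ := ih h'
      refine ⟨p :: pre, suf, by simp [hps], hq, ?_⟩
      intro r hr
      rcases List.mem_cons.mp hr with hr | hr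
      · exact hr ▸ hc
      · exact hpre r hr

-- key value of a candidate: getD = its index in the priority list
lemma pv_key_eq {g : String} {k : Nat} (h : PySem.List.index? pvPriorityA g = some k) :
    PySem.Dict.getD pvRanksB g 0 = (k : Int) := by
  rw [PySem.Dict.getD_eq_get?_getD, pv_ranks_get, h]
  rfl

lemma pv_scan_index {genres : List String} {q : String}
    (h : pvScanA genres pvPriorityA = some q) :
    q ∈ genres ∧ ∃ kq, PySem.List.index? pvPriorityA q = some kq ∧
      ∀ g ∈ genres, ∀ j, PySem.List.index? pvPriorityA g = some j → kq ≤ j := by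
  obtain ⟨pre, suf, hps, hq, hpre⟩ := pv_scan_some h
  refine ⟨hq, pre.length, ?_, ?_⟩
  · exact (PySem.List.index?_eq_some_iff _ _ _).mpr ⟨pre, suf, hps, rfl, fun hmem => hpre q hmem hq⟩
  · intro g hg j hj
    by_contra hlt
    rw [not_le] at hlt
    obtain ⟨hk, hget, _⟩ := PySem.List.getElem_of_index?_eq_some hj
    have hq? : pvPriorityA[j]? = some g := by
      rw [List.getElem?_eq_getElem hk, hget]
    have hpre? : pre[j]? = some g := by
      rw [← List.getElem?_append_left hlt, ← hps, hq?]
    exact hpre g (List.mem_of_getElem? hpre?) hg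

theorem get_primary_genre_spec : Claim_equal_get_primary_genre := by
  intro genres _
  unfold Spec_get_primary_genre
  by_cases hnil : genres = []
  · subst hnil; decide
  · by_cases hc : genres.filter (fun g => PySem.Dict.contains pvRanksB g) = []
    · -- no priority genre present: A falls through to sorted[0], B to min(genres)
      have hnot : ∀ p ∈ pvPriorityA, p ∉ genres := by
        intro p hp hmem
        have : p ∈ genres.filter (fun g => PySem.Dict.contains pvRanksB g) :=
          List.mem_filter.mpr ⟨hmem, (pv_ranks_contains p).mpr hp⟩
        simp [hc] at this
      have hscan : pvScanA genres pvPriorityA = none := by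
        cases hsc : pvScanA genres pvPriorityA with
        | none => rfl
        | some q =>
          obtain ⟨pre, suf, hps, hq, _⟩ := pv_scan_some hsc
          exact absurd hq (hnot q (by rw [hps]; exact List.mem_append_right _ (List.mem_cons_self)))
      cases hsrt : PySem.List.sorted genres (fun x => x) false with
      | nil => exact absurd ((PySem.List.sorted_eq_nil_iff _ _ _).mp hsrt) hnil
      | cons m t =>
        cases hmin : PySem.List.min? genres (fun x => x) with
        | none => exact absurd ((PySem.List.min?_eq_none_iff _ _).mp hmin) hnil
        | some m' =>
          have hm'g : m' ∈ genres := PySem.List.min?_mem hmin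
          have hmg : m ∈ genres := (PySem.List.mem_sorted _ _ _ m).mp (hsrt ▸ List.mem_cons_self)
          have h1 : m ≤ m' := PySem.List.key_head_sorted_le genres (fun x => x) hsrt m' hm'g
          have h2 : m' ≤ m := PySem.List.min?_isMin hmin m hmg
          have hmm : m = m' := le_antisymm h1 h2
          simp [get_primary_genre, get_primary_genre_alt, hscan, hnil, hc, hsrt, hmin, hmm]
    · -- some priority genre present
      cases hmin : PySem.List.min? (genres.filter (fun g => PySem.Dict.contains pvRanksB g))
          (fun g => PySem.Dict.getD pvRanksB g 0) with
      | none => exact absurd ((PySem.List.min?_eq_none_iff _ _).mp hmin) hc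
      | some m =>
        have hmc : m ∈ genres.filter (fun g => PySem.Dict.contains pvRanksB g) :=
          PySem.List.min?_mem hmin
        obtain ⟨hmg, hmcont⟩ := List.mem_filter.mp hmc
        have hmp : m ∈ pvPriorityA := (pv_ranks_contains m).mp hmcont
        obtain ⟨km, hkm⟩ := Option.isSome_iff_exists.mp
          ((PySem.List.index?_isSome_iff pvPriorityA m).mpr hmp)
        cases hsc : pvScanA genres pvPriorityA with
        | none => exact absurd hmg (pv_scan_none hsc m hmp)
        | some q =>
          obtain ⟨hqg, kq, hkq, hmin_kq⟩ := pv_scan_index hsc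
          have hqp : q ∈ pvPriorityA := by
            obtain ⟨hk, hget, _⟩ := PySem.List.getElem_of_index?_eq_some hkq
            exact hget ▸ List.getElem_mem _
          have hqc : q ∈ genres.filter (fun g => PySem.Dict.contains pvRanksB g) :=
            List.mem_filter.mpr ⟨hqg, (pv_ranks_contains q).mpr hqp⟩
          -- km ≤ kq from min?, kq ≤ km from the scan's minimality
          have hkey : (km : Int) ≤ (kq : Int) := by
            have := PySem.List.min?_isMin hmin q hqc
            rwa [pv_key_eq hkm, pv_key_eq hkq] at this
          have h1 : km ≤ kq := by exact_mod_cast hkey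
          have h2 : kq ≤ km := hmin_kq m hmg km hkm
          have hkk : km = kq := le_antisymm h1 h2
          have hmq : m = q := by
            obtain ⟨hk1, hg1, _⟩ := PySem.List.getElem_of_index?_eq_some hkm
            obtain ⟨hk2, hg2, _⟩ := PySem.List.getElem_of_index?_eq_some hkq
            rw [← hg1, ← hg2]
            simp [hkk]
          simp [get_primary_genre, get_primary_genre_alt, hsc, hnil, hc, hmin, hmq]
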